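-- pv_equiv track=rewrite | github.com/dip-proto/xvcl | src/xvcl/compiler.py | _count_unquoted_delimiters
-- ===== SOURCE A (Python) =====
-- def _count_unquoted_delimiters(text: str) -> tuple[int, int]:
--     """
--     Count parentheses and bracket balance, ignoring those inside string literals.
--     Returns (paren_depth, bracket_depth).
--     """
--     paren_depth = 0
--     bracket_depth = 0
--     in_string = False
--     string_char = None
--     i = 0
--     while i < len(text):
--         char = text[i]
--         if in_string:
--             if char == "\\" and i + 1 < len(text):
--                 i += 2
--                 continue
--             elif char == string_char:
--                 in_string = False
--         else:
--             if char in ('"', "'"):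
--                 in_string = True
--                 string_char = char
--             elif char == "(":
--                 paren_depth += 1
--             elif char == ")":
--                 paren_depth -= 1
--             elif char == "[":
--                 bracket_depth += 1
--             elif char == "]":
--                 bracket_depth -= 1
--         i += 1
--     return paren_depth, bracket_depth
-- ===== SOURCE B (Python) =====
-- def _count_unquoted_delimiters(text: str) -> tuple[int, int]:
--     """Strip string literals first, then count delimiters on the cleaned text."""
--     cleaned = []
--     i = 0
--     n = len(text)
--     while i < n:
--         c = text[i]
--         if c in ('"', "'"):
--             i += 1
--             while i < n:
--                 if text[i] == "\\" and i + 1 < n: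
--                     i += 2
--                 elif text[i] == c:
--                     i += 1
--                     break
--                 else:
--                     i += 1
--         else:
--             cleaned.append(c)
--             i += 1
--     s = "".join(cleaned)
--     return s.count("(") - s.count(")"), s.count("[") - s.count("]")
-- ===== Notes on version B (the rewrite author's own statement) =====
-- stated objective: alternative
-- what changed: B first strips all string literals from the text into a cleaned string (a dedicated skip pass per literal) and then obtains the two balances with four str.count calls, instead of A's single index-driven state machine with in_string/string_char flags adjusting four counters inline.
import Mathlib
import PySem

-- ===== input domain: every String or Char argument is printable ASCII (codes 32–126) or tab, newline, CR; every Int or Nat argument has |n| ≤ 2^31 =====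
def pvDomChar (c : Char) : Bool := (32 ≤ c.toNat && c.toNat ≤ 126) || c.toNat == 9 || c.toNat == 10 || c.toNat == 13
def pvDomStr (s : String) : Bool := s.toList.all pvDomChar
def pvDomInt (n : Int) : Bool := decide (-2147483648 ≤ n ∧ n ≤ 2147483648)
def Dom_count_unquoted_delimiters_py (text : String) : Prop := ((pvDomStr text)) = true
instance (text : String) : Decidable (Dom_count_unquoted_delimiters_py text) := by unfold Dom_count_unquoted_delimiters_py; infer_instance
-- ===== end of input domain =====

-- B strips string literals into a cleaned text first and then counts each delimiter with str.count,
-- instead of A's single stateful scan (in_string/string_char flags) that adjusts four counters inline.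

-- ===== PORT A =====
-- A's while loop over the index, with state (paren_depth, bracket_depth, in_string, string_char);
-- 'i += 2; continue' becomes recursing on rest.tail.
def pvALoop : List Char → Int → Int → Bool → Option Char → Int × Int
  | [], p, b, _, _ => (p, b)
  | c :: rest, p, b, inStr, sc =>
    if inStr then
      if c = '\\' ∧ rest ≠ [] then pvALoop rest.tail p b inStr sc
      else if some c = sc then pvALoop rest p b false sc
      else pvALoop rest p b inStr sc
    else
      if c = '"' ∨ c = '\'' then pvALoop rest p b true (some c)
      else if c = '(' then pvALoop rest (p + 1) b inStr sc
      else if c = ')' then pvALoop rest (p - 1) b inStr sc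
      else if c = '[' then pvALoop rest p (b + 1) inStr sc
      else if c = ']' then pvALoop rest p (b - 1) inStr sc
      else pvALoop rest p b inStr sc
  termination_by cs => cs.length
  decreasing_by all_goals ((try simp [List.length_tail]); try omega)

def count_unquoted_delimiters_py (text : String) : Int × Int :=
  pvALoop text.toList 0 0 false none

-- ===== PORT B =====
-- B's inner while loop: consume the body of a string literal opened by quote q, returning the rest.
def pvSkip (q : Char) : List Char → List Char
  | [] => []
  | c :: rest =>
    if c = '\\' ∧ rest ≠ [] then pvSkip q rest.tail
    else if c = q then rest
    else pvSkip q rest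
  termination_by cs => cs.length
  decreasing_by all_goals ((try simp [List.length_tail]); try omega)

-- needed by pvStrip's termination proof
theorem pvSkip_length_le (q : Char) (cs : List Char) : (pvSkip q cs).length ≤ cs.length := by
  match cs with
  | [] => simp [pvSkip]
  | c :: rest =>
    rw [pvSkip]
    split
    · have := pvSkip_length_le q rest.tail
      simp [List.length_tail] at *; omega
    · split
      · simp
      · have := pvSkip_length_le q rest
        simp; omega
  termination_by cs.length
  decreasing_by all_goals ((try simp [List.length_tail]); try omega)

-- B's outer while loop: the cleaned text (string literals removed).
def pvStrip : List Char → List Char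
  | [] => []
  | c :: rest =>
    if c = '"' ∨ c = '\'' then pvStrip (pvSkip c rest)
    else c :: pvStrip rest
  termination_by cs => cs.length
  decreasing_by
    · have := pvSkip_length_le c rest; simp; omega
    · simp

-- List.count ports str.count for a single-character needle (exact there).
def count_unquoted_delimiters_py_alt (text : String) : Int × Int :=
  let cleaned := pvStrip text.toList
  (((cleaned.count '(' : Int) - (cleaned.count ')' : Int)),
   ((cleaned.count '[' : Int) - (cleaned.count ']' : Int)))

-- ===== PRECONDITION & SPEC =====
def Spec_count_unquoted_delimiters_py (text : String) (out : Int × Int) : Prop := out = count_unquoted_delimiters_py_alt text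
instance (text : String) (out : Int × Int) : Decidable (Spec_count_unquoted_delimiters_py text out) := by unfold Spec_count_unquoted_delimiters_py; infer_instance

-- ===== CLAIM (what is proved, stated in full; the proofs are below) =====
def Claim_equal_count_unquoted_delimiters_py : Prop := ∀ (text : String), Dom_count_unquoted_delimiters_py text → Spec_count_unquoted_delimiters_py text (count_unquoted_delimiters_py text)

-- ===== LEMMAS AND PROOFS =====

-- Inside a string literal opened by q, A's scan behaves like B's pvSkip: it lands after the
-- literal with counters untouched.
theorem pvALoop_inString (cs : List Char) (p b : Int) (q : Char) :
    pvALoop cs p b true (some q) = pvALoop (pvSkip q cs) p b false (some q) := by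
  match cs with
  | [] => rw [pvSkip]; simp [pvALoop]
  | c :: rest =>
    rw [pvALoop, pvSkip]
    simp only [if_true]
    by_cases h1 : c = '\\' ∧ rest ≠ []
    · rw [if_pos h1, if_pos h1]
      exact pvALoop_inString rest.tail p b q
    · rw [if_neg h1, if_neg h1]
      by_cases h2 : c = q
      · rw [if_pos (congrArg some h2), if_pos h2]
      · have h2' : ¬ some c = some q := by simpa using h2
        rw [if_neg h2', if_neg h2]
        exact pvALoop_inString rest p b q
  termination_by cs.length
  decreasing_by all_goals ((try simp [List.length_tail]); try omega)

theorem pvALoop_eq_strip (cs : List Char) (p b : Int) (sc : Option Char) :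
    pvALoop cs p b false sc =
      (p + ((pvStrip cs).count '(' : Int) - ((pvStrip cs).count ')' : Int),
       b + ((pvStrip cs).count '[' : Int) - ((pvStrip cs).count ']' : Int)) := by
  match cs with
  | [] => rw [pvALoop, pvStrip]; simp
  | c :: rest =>
    rw [pvALoop, pvStrip]
    simp only [if_neg (Bool.false_ne_true)]
    by_cases hq : c = '"' ∨ c = '\''
    · rw [if_pos hq, if_pos hq, pvALoop_inString,
        pvALoop_eq_strip (pvSkip c rest) p b (some c)]
    · rw [if_neg hq, if_neg hq]
      have hrec := fun p' b' => pvALoop_eq_strip rest p' b' sc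
      by_cases h1 : c = '('
      · rw [if_pos h1, hrec]; subst h1; simp [Prod.ext_iff]; omega
      · rw [if_neg h1]
        by_cases h2 : c = ')'
        · rw [if_pos h2, hrec]; subst h2; simp [Prod.ext_iff]; omega
        · rw [if_neg h2]
          by_cases h3 : c = '['
          · rw [if_pos h3, hrec]; subst h3; simp [Prod.ext_iff]; omega
          · rw [if_neg h3]
            by_cases h4 : c = ']'
            · rw [if_pos h4, hrec]; subst h4; simp [Prod.ext_iff]; omega
            · rw [if_neg h4, hrec]
              simp [h1, h2, h3, h4]
  termination_by cs.length
  decreasing_by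
    · have := pvSkip_length_le c rest; simp; omega
    all_goals simp

-- ===== VERDICT (by name: the statement is the Claim_ definition above) =====
theorem count_unquoted_delimiters_py_spec : Claim_equal_count_unquoted_delimiters_py := by
  intro text _
  unfold Spec_count_unquoted_delimiters_py count_unquoted_delimiters_py count_unquoted_delimiters_py_alt
  rw [pvALoop_eq_strip]
  simp
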